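-- pv_equiv track=rewrite | github.com/apoorvib/AIWriter | essay_writer/sources/chunking.py | _overlap_parts
-- ===== SOURCE A (Python) =====
-- def _overlap_parts(parts: list[tuple[int, str]], overlap_chars: int) -> list[tuple[int, str]]:
--     if overlap_chars == 0:
--         return []
--     kept: list[tuple[int, str]] = []
--     total = 0
--     for page_number, text in reversed(parts):
--         if total >= overlap_chars:
--             break
--         if total + len(text) <= overlap_chars:
--             kept.append((page_number, text))
--             total += len(text)
--             continue
--         keep_len = overlap_chars - total
--         kept.append((page_number, text[-keep_len:]))
--         total += keep_len
--     kept.reverse()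
--     return kept
-- ===== SOURCE B (Python) =====
-- def _overlap_parts(parts: list[tuple[int, str]], overlap_chars: int) -> list[tuple[int, str]]:
--     if overlap_chars <= 0:
--         return []
--     total = 0
--     k = 0
--     for _, text in reversed(parts):
--         k += 1
--         total += len(text)
--         if total >= overlap_chars:
--             break
--     if total < overlap_chars:
--         return list(parts)
--     tail = parts[-k:]
--     page, text = tail[0]
--     excess = total - overlap_chars
--     return [(page, text[excess:])] + tail[1:]
-- ===== Notes on version B (the rewrite author's own statement) =====
-- stated objective: alternative
-- what changed: B scans reversed(parts) only to count how many trailing parts (k) are consumed and the running total, then builds the result by slicing: parts[-k:] with the first element's text cut at text[excess:], instead of A's loop that appends (possibly truncated) pairs to an accumulator and reverses it at the end.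
import Mathlib
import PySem

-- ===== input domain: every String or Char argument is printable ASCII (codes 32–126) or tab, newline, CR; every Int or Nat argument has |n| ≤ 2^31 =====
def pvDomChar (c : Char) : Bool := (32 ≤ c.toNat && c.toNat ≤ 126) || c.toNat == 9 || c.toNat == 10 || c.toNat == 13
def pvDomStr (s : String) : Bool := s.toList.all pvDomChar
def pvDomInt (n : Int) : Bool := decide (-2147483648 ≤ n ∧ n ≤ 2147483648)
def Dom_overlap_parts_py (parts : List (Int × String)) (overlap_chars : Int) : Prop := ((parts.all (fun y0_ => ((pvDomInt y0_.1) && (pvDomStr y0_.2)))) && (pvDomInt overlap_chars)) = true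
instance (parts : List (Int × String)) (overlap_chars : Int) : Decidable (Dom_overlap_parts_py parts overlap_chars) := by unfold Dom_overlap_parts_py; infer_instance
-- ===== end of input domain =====

-- B computes the cutoff count of trailing parts first and builds the result by slicing,
-- instead of A's append-truncate-and-reverse accumulation; objective: alternative decomposition.


-- ===== PORT A =====
-- the 'for page_number, text in reversed(parts)' loop with its break, carrying (kept, total)
def overlapALoop (ov : Int) : List (Int × String) → List (Int × String) → Int → List (Int × String)
  | [], kept, _ => kept
  | (page_number, text) :: rest, kept, total =>
    if ov ≤ total then kept
    else if total + PySem.Str.len text ≤ ov then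
      overlapALoop ov rest (kept ++ [(page_number, text)]) (total + PySem.Str.len text)
    else
      let keep_len := ov - total
      overlapALoop ov rest (kept ++ [(page_number, PySem.Str.slice text (some (-keep_len)) none)]) (total + keep_len)

def overlap_parts_py (parts : List (Int × String)) (overlap_chars : Int) : List (Int × String) :=
  if overlap_chars = 0 then []
  else (overlapALoop overlap_chars parts.reverse [] 0).reverse

-- ===== PORT B =====
-- B's scan over reversed(parts): returns (total, k) — k the number of trailing parts consumed
def overlapBScan (ov : Int) : List (Int × String) → Int → Int → Int × Int
  | [], total, k => (total, k)
  | (_, text) :: rest, total, k =>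
    if ov ≤ total + PySem.Str.len text then (total + PySem.Str.len text, k + 1)
    else overlapBScan ov rest (total + PySem.Str.len text) (k + 1)

def overlap_parts_py_alt (parts : List (Int × String)) (overlap_chars : Int) : List (Int × String) :=
  if overlap_chars ≤ 0 then []
  else
    let r := overlapBScan overlap_chars parts.reverse 0 0
    if r.1 < overlap_chars then parts
    else
      let tail := PySem.List.slice parts (some (-r.2)) none
      let hd := PySem.List.pyGetD tail 0 (0, "")   -- tail[0]; in range: k ≥ 1 whenever the budget was reached
      let excess := r.1 - overlap_chars
      [(hd.1, PySem.Str.slice hd.2 (some excess) none)] ++ PySem.List.slice tail (some 1) none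

-- ===== PRECONDITION & SPEC =====
def Spec_overlap_parts_py (parts : List (Int × String)) (overlap_chars : Int) (out : List (Int × String)) : Prop := out = overlap_parts_py_alt parts overlap_chars
instance (parts : List (Int × String)) (overlap_chars : Int) (out : List (Int × String)) : Decidable (Spec_overlap_parts_py parts overlap_chars out) := by unfold Spec_overlap_parts_py; infer_instance

-- ===== CLAIM (what is proved, stated in full; the proofs are below) =====
def Claim_equal_overlap_parts_py : Prop := ∀ (parts : List (Int × String)) (overlap_chars : Int), Dom_overlap_parts_py parts overlap_chars → Spec_overlap_parts_py parts overlap_chars (overlap_parts_py parts overlap_chars)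

-- ===== LEMMAS AND PROOFS =====

theorem strEq_of_toList {s t : String} (h : s.toList = t.toList) : s = t :=
  String.toList_inj.mp h

-- the loop returns kept unchanged once the budget is met
theorem aLoop_stop (ov : Int) (lst kept : List (Int × String)) (total : Int)
    (h : ov ≤ total) : overlapALoop ov lst kept total = kept := by
  cases lst with
  | nil => rfl
  | cons x rest => obtain ⟨p, t⟩ := x; simp [overlapALoop, h]

-- the accumulator is only appended to
theorem aLoop_acc (ov : Int) (lst : List (Int × String)) : ∀ kept total,
    overlapALoop ov lst kept total = kept ++ overlapALoop ov lst [] total := by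
  induction lst with
  | nil => intro kept total; simp [overlapALoop]
  | cons x rest ih =>
    obtain ⟨p, t⟩ := x
    intro kept total
    simp only [overlapALoop]
    split_ifs with h1 h2
    · simp
    · rw [ih (kept ++ [(p, t)]), ih ([] ++ [(p, t)])]; simp
    · rw [ih (kept ++ [(p, PySem.Str.slice t (some (-(ov - total))) none)]),
          ih ([] ++ [(p, PySem.Str.slice t (some (-(ov - total))) none)])]
      simp

-- only ov - total matters
theorem aLoop_shift (lst : List (Int × String)) : ∀ ov total,
    overlapALoop ov lst [] total = overlapALoop (ov - total) lst [] 0 := by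
  induction lst with
  | nil => intro ov total; rfl
  | cons x rest ih =>
    obtain ⟨p, t⟩ := x
    intro ov total
    have hL : (0 : Int) ≤ PySem.Str.len t := by simp [PySem.Str.len_eq]
    simp only [overlapALoop]
    by_cases h1 : ov ≤ total
    · rw [if_pos h1, if_pos (show ov - total ≤ 0 by omega)]
    · rw [if_neg h1, if_neg (show ¬ ov - total ≤ 0 by omega)]
      by_cases h2 : total + PySem.Str.len t ≤ ov
      · rw [if_pos h2, if_pos (show 0 + PySem.Str.len t ≤ ov - total by omega)]
        rw [aLoop_acc ov rest ([] ++ [(p, t)]), aLoop_acc (ov - total) rest ([] ++ [(p, t)]),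
            ih ov (total + PySem.Str.len t), ih (ov - total) (0 + PySem.Str.len t)]
        have h3 : ov - (total + PySem.Str.len t) = ov - total - (0 + PySem.Str.len t) := by ring
        rw [h3]
      · rw [if_neg h2, if_neg (show ¬ 0 + PySem.Str.len t ≤ ov - total by omega)]
        rw [aLoop_stop _ _ _ _ (by omega), aLoop_stop _ _ _ _ (by omega)]
        simp

-- shift lemma for B's scan
theorem bScan_shift (lst : List (Int × String)) : ∀ ov total k,
    overlapBScan ov lst total k =
      ((overlapBScan (ov - total) lst 0 0).1 + total, (overlapBScan (ov - total) lst 0 0).2 + k) := by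
  induction lst with
  | nil => intro ov total k; simp [overlapBScan]
  | cons x rest ih =>
    obtain ⟨p, t⟩ := x
    intro ov total k
    simp only [overlapBScan]
    by_cases h1 : ov ≤ total + PySem.Str.len t
    · rw [if_pos h1, if_pos (show ov - total ≤ 0 + PySem.Str.len t by omega)]
      simp; omega
    · rw [if_neg h1, if_neg (show ¬ ov - total ≤ 0 + PySem.Str.len t by omega)]
      rw [ih ov (total + PySem.Str.len t) (k + 1), ih (ov - total) (0 + PySem.Str.len t) (0 + 1)]
      have : ov - (total + PySem.Str.len t) = ov - total - (0 + PySem.Str.len t) := by ring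
      rw [this]
      simp
      omega

-- bounds on the scan result
theorem bScan_bounds (lst : List (Int × String)) : ∀ ov,
    0 ≤ (overlapBScan ov lst 0 0).2 ∧ (overlapBScan ov lst 0 0).2 ≤ (lst.length : Int) ∧
    (0 < ov → ov ≤ (overlapBScan ov lst 0 0).1 → 1 ≤ (overlapBScan ov lst 0 0).2) := by
  induction lst with
  | nil => intro ov; simp [overlapBScan]
  | cons x rest ih =>
    obtain ⟨p, t⟩ := x
    intro ov
    simp only [overlapBScan]
    split_ifs with h1
    · simp
    · rw [bScan_shift rest ov (0 + PySem.Str.len t) (0 + 1)]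
      have h2 := ih (ov - (0 + PySem.Str.len t))
      simp only [List.length_cons] at h2 ⊢
      push_cast
      omega

theorem sliceStr_zero (s : String) : PySem.Str.slice s (some 0) none = s := by
  apply strEq_of_toList; simp

theorem sliceStr_neg_eq_pos (s : String) (k : Int) (h1 : 0 < k) (h2 : k ≤ (s.toList.length : Int)) :
    PySem.Str.slice s (some (-k)) none = PySem.Str.slice s (some ((s.toList.length : Int) - k)) none := by
  apply strEq_of_toList
  simp only [PySem.Str.toList_slice, PySem.Chars.slice_eq_listSlice]
  have hk : k = (k.toNat : Int) := by omega
  rw [hk, PySem.List.slice_from_neg_natCast _ _ (by omega),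
      PySem.List.slice_from _ (by omega)]
  rw [show ((s.toList.length : Int) - (k.toNat : Int)).toNat = s.toList.length - k.toNat from by omega]

theorem sliceList_from_neg (xs : List (Int × String)) (k : Int) (h1 : 0 < k) (_h2 : k ≤ (xs.length : Int)) :
    PySem.List.slice xs (some (-k)) none = xs.drop (xs.length - k.toNat) := by
  have hk : k = (k.toNat : Int) := by omega
  rw [hk, PySem.List.slice_from_neg_natCast _ _ (by omega)]
  rw [show ((k.toNat : Int)).toNat = k.toNat from by omega]

-- the core equivalence, by induction on parts from the right
theorem core (parts : List (Int × String)) : ∀ ov : Int, 0 < ov →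
    overlap_parts_py parts ov = overlap_parts_py_alt parts ov := by
  induction parts using List.reverseRecOn with
  | nil =>
    intro ov hov
    simp [overlap_parts_py, overlap_parts_py_alt, overlapALoop, overlapBScan]
  | append_singleton init l ih =>
    obtain ⟨p, x⟩ := l
    intro ov hov
    have hL0 : (0 : Int) ≤ PySem.Str.len x := by simp [PySem.Str.len_eq]
    have hLlen : PySem.Str.len x = (x.toList.length : Int) := by simp [PySem.Str.len_eq]
    simp only [overlap_parts_py, overlap_parts_py_alt, List.reverse_append,
      List.reverse_cons, List.reverse_nil, List.nil_append, List.singleton_append]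
    rw [if_neg (show ¬ ov = 0 by omega), if_neg (show ¬ ov ≤ 0 by omega)]
    simp only [overlapALoop, overlapBScan, zero_add]
    rw [if_neg (show ¬ ov ≤ 0 by omega)]
    by_cases hcmp : ov ≤ PySem.Str.len x
    · -- the last part alone meets the budget: both return a single (possibly truncated) pair
      rw [if_pos hcmp, if_neg (show ¬ PySem.Str.len x < ov by omega)]
      rw [sliceList_from_neg _ 1 (by omega) (by simp)]
      rw [show (init ++ [(p, x)]).length - (1 : Int).toNat = init.length from by
        simp]
      rw [List.drop_left]
      rw [PySem.List.pyGetD_zero_cons, PySem.List.slice_from_one]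
      simp only [List.tail_cons]
      by_cases ha : PySem.Str.len x ≤ ov
      · -- exact fit: ov = len x, excess = 0
        rw [if_pos ha, aLoop_stop _ _ _ _ (by omega)]
        rw [show PySem.Str.len x - ov = 0 from by omega, sliceStr_zero]
        simp
      · -- truncation: x[-ov:] = x[len-ov:]
        rw [if_neg ha, aLoop_stop _ _ _ _ (by omega)]
        rw [show ov - 0 = ov from by ring]
        rw [sliceStr_neg_eq_pos x ov (by omega) (by omega)]
        rw [← hLlen]
        simp
    · -- the last part fits entirely: both recurse on init with budget ov - len x
      rw [if_neg hcmp, if_pos (show PySem.Str.len x ≤ ov by omega)]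
      rw [aLoop_acc ov init.reverse ([] ++ [(p, x)]), aLoop_shift init.reverse ov (PySem.Str.len x)]
      rw [bScan_shift init.reverse ov (PySem.Str.len x) 1]
      have hih := ih (ov - PySem.Str.len x) (by omega)
      simp only [overlap_parts_py, overlap_parts_py_alt,
        if_neg (show ¬ ov - PySem.Str.len x = 0 by omega),
        if_neg (show ¬ ov - PySem.Str.len x ≤ 0 by omega)] at hih
      have hb := bScan_bounds init.reverse (ov - PySem.Str.len x)
      set r := overlapBScan (ov - PySem.Str.len x) init.reverse 0 0 with hr
      by_cases hreach : r.1 < ov - PySem.Str.len x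
      · -- budget never reached: both return all of init ++ [(p, x)]
        rw [if_pos (show r.1 + PySem.Str.len x < ov by omega)]
        rw [if_pos hreach] at hih
        rw [List.nil_append, List.reverse_append, hih]
        simp
      · -- budget reached inside init
        rw [if_neg (show ¬ r.1 + PySem.Str.len x < ov by omega)]
        rw [if_neg hreach] at hih
        have hk1 : 1 ≤ r.2 := hb.2.2 (by omega) (by omega)
        have hklen : r.2 ≤ (init.length : Int) := by
          have := hb.2.1; simpa using this
        -- the big tail is the small tail with (p, x) appended
        rw [sliceList_from_neg _ (r.2 + 1) (by omega) (by simp; omega)]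
        rw [sliceList_from_neg _ r.2 (by omega) (by simpa using hklen)] at hih
        rw [show (init ++ [(p, x)]).length - (r.2 + 1).toNat = init.length - r.2.toNat from by
          simp; omega]
        rw [List.drop_append_of_le_length (by omega)]
        have hlen : 1 ≤ (init.drop (init.length - r.2.toNat)).length := by
          simp; omega
        obtain ⟨h, tl, hts⟩ : ∃ h tl, init.drop (init.length - r.2.toNat) = h :: tl := by
          cases hd : init.drop (init.length - r.2.toNat) with
          | nil => rw [hd] at hlen; simp at hlen
          | cons a b => exact ⟨a, b, rfl⟩
        rw [hts]
        rw [hts] at hih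
        rw [PySem.List.pyGetD_zero_cons, PySem.List.slice_from_one] at hih
        simp only [List.cons_append]
        rw [PySem.List.pyGetD_zero_cons, PySem.List.slice_from_one]
        simp only [List.cons_append, List.tail_cons] at hih ⊢
        rw [show r.1 + PySem.Str.len x - ov = r.1 - (ov - PySem.Str.len x) from by ring]
        rw [List.reverse_append, hih]
        simp

-- ===== VERDICT (by name: the statement is the Claim_ definition above) =====
theorem overlap_parts_py_spec : Claim_equal_overlap_parts_py := by
  intro parts ov _
  unfold Spec_overlap_parts_py
  by_cases hov : 0 < ov
  · exact core parts ov hov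
  · simp only [overlap_parts_py, overlap_parts_py_alt, if_pos (by omega : ov ≤ 0)]
    rcases eq_or_lt_of_le (by omega : ov ≤ 0) with h | h
    · simp [h]
    · rw [if_neg (by omega : ¬ ov = 0)]
      rw [aLoop_stop ov parts.reverse [] 0 (by omega)]
      rfl
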